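-- pv_equiv track=rewrite | github.com/Ibrahem-Ali-99/VocalMind | services/rag/ingestion-pipeline/ingestion_pipeline.py | repair_orphaned_table_rows
-- ===== SOURCE A (Python) =====
-- def repair_orphaned_table_rows(markdown_text: str) -> str:
--     """Re-attach pipe-table rows separated from their table by blank lines."""
--     lines, output, i = markdown_text.splitlines(), [], 0
--     while i < len(lines):
--         output.append(lines[i])
--         if lines[i].strip().startswith("|"):
--             j = i + 1
--             while j < len(lines) and lines[j].strip() == "":
--                 j += 1
--             if j < len(lines) and lines[j].strip().startswith("|"):
--                 i = j
--                 continue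
--         i += 1
--     return "\n".join(output)
-- ===== SOURCE B (Python) =====
-- def repair_orphaned_table_rows(markdown_text: str) -> str:
--     """Re-attach pipe-table rows separated from their table by blank lines."""
--     output = []
--     pending = []          # buffered blank lines not yet emitted
--     last_pipe = False     # did the last emitted non-blank line start with '|'?
--     for line in markdown_text.splitlines():
--         if line.strip() == "":
--             pending.append(line)
--         else:
--             if last_pipe and line.strip().startswith("|"):
--                 pending.clear()
--             else:
--                 output.extend(pending)
--                 pending.clear()
--             output.append(line)
--             last_pipe = line.strip().startswith("|")
--     output.extend(pending)
--     return "\n".join(output)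
-- ===== Notes on version B (the rewrite author's own statement) =====
-- stated objective: simpler
-- what changed: Replaces A's index-jumping while loop with an inner blank-skipping scan by a single forward pass that buffers pending blank lines and tracks whether the last emitted non-blank line was a pipe-table row, discarding the buffer when two table rows meet.
import Mathlib
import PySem

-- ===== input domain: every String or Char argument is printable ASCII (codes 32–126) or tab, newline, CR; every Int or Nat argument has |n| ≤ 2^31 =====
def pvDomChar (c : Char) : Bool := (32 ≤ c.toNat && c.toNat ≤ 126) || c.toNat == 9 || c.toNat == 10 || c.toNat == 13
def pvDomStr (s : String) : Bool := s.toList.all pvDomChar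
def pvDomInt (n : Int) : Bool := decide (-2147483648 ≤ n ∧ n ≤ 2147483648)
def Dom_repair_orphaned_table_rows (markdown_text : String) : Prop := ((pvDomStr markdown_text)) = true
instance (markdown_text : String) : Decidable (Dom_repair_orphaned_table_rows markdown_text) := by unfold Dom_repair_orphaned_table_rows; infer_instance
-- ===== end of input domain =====

-- B replaces A's index-jumping while loop by a single forward pass with a buffer of
-- pending blank lines and a last-line-was-pipe flag (objective: simpler decomposition).

-- ===== PORT A =====
-- shared one-line predicates: line.strip().startswith("|") and line.strip() == ""
def pvPipe (s : String) : Bool := PySem.Str.startswith (PySem.Str.strip s) "|"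
def pvBlank (s : String) : Bool := PySem.Str.strip s == ""

-- inner while: advance j over blank lines (fuel = lines.length makes the loop total;
-- it never runs out before the guard j < len fails)
def pvSkipBlanks (lines : List String) (fuel : Nat) (j : Nat) : Nat :=
  match fuel with
  | 0 => j
  | fuel + 1 =>
    if h : j < lines.length then
      if pvBlank lines[j] then pvSkipBlanks lines fuel (j + 1) else j
    else j

-- outer while loop of A, state (i, output); i strictly increases, so fuel = lines.length suffices
def pvLoopA (lines : List String) (fuel : Nat) (i : Nat) (output : List String) : List String :=
  match fuel with
  | 0 => output
  | fuel + 1 =>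
    if h : i < lines.length then
      let output' := output ++ [lines[i]]
      if pvPipe lines[i] then
        let j := pvSkipBlanks lines lines.length (i + 1)
        if h2 : j < lines.length then
          if pvPipe lines[j] then pvLoopA lines fuel j output'
          else pvLoopA lines fuel (i + 1) output'
        else pvLoopA lines fuel (i + 1) output'
      else pvLoopA lines fuel (i + 1) output'
    else output

def repair_orphaned_table_rows (markdown_text : String) : String :=
  let lines := PySem.Str.splitlines markdown_text
  PySem.Str.join "\n" (pvLoopA lines lines.length 0 [])

-- ===== PORT B =====
-- one step of B's forward pass; state = (output, pending blanks, last non-blank was pipe)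
def pvStepB (st : List String × List String × Bool) (line : String) :
    List String × List String × Bool :=
  let (output, pending, lastPipe) := st
  if pvBlank line then (output, pending ++ [line], lastPipe)
  else if lastPipe && pvPipe line then (output ++ [line], [], pvPipe line)
  else ((output ++ pending) ++ [line], [], pvPipe line)

def repair_orphaned_table_rows_alt (markdown_text : String) : String :=
  let r := (PySem.Str.splitlines markdown_text).foldl pvStepB ([], [], false)
  PySem.Str.join "\n" (r.1 ++ r.2.1)

-- ===== PRECONDITION & SPEC =====
def Spec_repair_orphaned_table_rows (markdown_text : String) (out : String) : Prop := out = repair_orphaned_table_rows_alt markdown_text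
instance (markdown_text : String) (out : String) : Decidable (Spec_repair_orphaned_table_rows markdown_text out) := by unfold Spec_repair_orphaned_table_rows; infer_instance

-- ===== CLAIM (what is proved, stated in full; the proofs are below) =====
def Claim_equal_repair_orphaned_table_rows : Prop := ∀ (markdown_text : String), Dom_repair_orphaned_table_rows markdown_text → Spec_repair_orphaned_table_rows markdown_text (repair_orphaned_table_rows markdown_text)

-- ===== LEMMAS AND PROOFS =====

theorem pvBlank_not_pipe {l : String} (h : pvBlank l = true) : pvPipe l = false := by
  unfold pvBlank at h
  unfold pvPipe
  rw [eq_of_beq h]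
  decide

theorem pvPipe_not_blank {l : String} (h : pvPipe l = true) : pvBlank l = false := by
  cases hb : pvBlank l with
  | false => rfl
  | true => rw [pvBlank_not_pipe hb] at h; exact absurd h (by simp)

-- list-level reformulation of B's fold
def goB (pend : List String) (flag : Bool) (ls : List String) : List String :=
  match ls with
  | [] => pend
  | l :: rest =>
    if pvBlank l then goB (pend ++ [l]) flag rest
    else (if flag && pvPipe l then [] else pend) ++ l :: goB [] (pvPipe l) rest

theorem foldl_stepB (ls : List String) :
    ∀ (out pend : List String) (flag : Bool),
    (ls.foldl pvStepB (out, pend, flag)).1 ++ (ls.foldl pvStepB (out, pend, flag)).2.1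
      = out ++ goB pend flag ls := by
  induction ls with
  | nil => intro out pend flag; simp [goB]
  | cons l rest ih =>
    intro out pend flag
    rw [List.foldl_cons, goB]
    by_cases hb : pvBlank l = true
    · simp only [pvStepB, hb, if_true]
      exact ih out (pend ++ [l]) flag
    · simp only [pvStepB, hb, if_false, Bool.false_eq_true]
      by_cases hf : (flag && pvPipe l) = true
      · simp only [hf, if_true]
        rw [ih (out ++ [l]) [] (pvPipe l)]
        simp
      · simp only [hf, if_false, Bool.false_eq_true]
        rw [ih ((out ++ pend) ++ [l]) [] (pvPipe l)]
        simp

-- goB characterized by the blank span of ls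
theorem goB_span (ls : List String) :
    ∀ (pend : List String) (flag : Bool),
    goB pend flag ls =
      match ls.dropWhile pvBlank with
      | [] => pend ++ ls.takeWhile pvBlank
      | l' :: r' =>
          (if flag && pvPipe l' then [] else pend ++ ls.takeWhile pvBlank)
            ++ l' :: goB [] (pvPipe l') r' := by
  induction ls with
  | nil => intro pend flag; simp [goB]
  | cons l rest ih =>
    intro pend flag
    by_cases hb : pvBlank l = true
    · rw [goB]
      simp only [hb, if_true, List.dropWhile_cons_of_pos hb, List.takeWhile_cons_of_pos hb]
      rw [ih (pend ++ [l]) flag]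
      cases h : rest.dropWhile pvBlank with
      | nil => simp
      | cons l' r' =>
        by_cases hf : (flag && pvPipe l') = true <;> simp [hf]
    · rw [goB]
      rw [List.dropWhile_cons_of_neg hb, List.takeWhile_cons_of_neg hb]
      simp only [hb, if_false, Bool.false_eq_true]
      by_cases hf : (flag && pvPipe l) = true <;> simp [hf]

theorem goB_span_nil {ls : List String} (pend : List String) (flag : Bool)
    (h : ls.dropWhile pvBlank = []) : goB pend flag ls = pend ++ ls.takeWhile pvBlank := by
  rw [goB_span, h]

theorem goB_span_cons {ls : List String} (pend : List String) (flag : Bool)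
    {l' : String} {r' : List String} (h : ls.dropWhile pvBlank = l' :: r') :
    goB pend flag ls =
      (if flag && pvPipe l' then [] else pend ++ ls.takeWhile pvBlank)
        ++ l' :: goB [] (pvPipe l') r' := by
  rw [goB_span, h]

-- a pending buffer under flag = false is simply flushed in front
theorem goB_pend_false (ls pend : List String) :
    goB pend false ls = pend ++ goB [] false ls := by
  cases h : ls.dropWhile pvBlank with
  | nil => rw [goB_span_nil pend false h, goB_span_nil [] false h]; simp
  | cons l' r' =>
    rw [goB_span_cons pend false h, goB_span_cons [] false h]; simp

-- a non-pipe head is emitted and the flag becomes its pipe-ness (false)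
theorem goB_cons_nonpipe {l : String} (rest : List String) (h : pvPipe l = false) :
    goB [] false (l :: rest) = l :: goB [] false rest := by
  by_cases hb : pvBlank l = true
  · rw [goB]
    simp only [hb, if_true, List.nil_append]
    exact goB_pend_false rest [l]
  · rw [goB]
    simp [hb, h]

-- a pipe head is emitted and the flag becomes true
theorem goB_cons_pipe {l : String} (rest : List String) (h : pvPipe l = true) :
    goB [] false (l :: rest) = l :: goB [] true rest := by
  rw [goB]
  simp [pvPipe_not_blank h, h]

-- if the first non-blank line (if any) is not a pipe line, the flag is irrelevant
theorem goB_flag_irrel {ls : List String}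
    (h : ∀ l' r', ls.dropWhile pvBlank = l' :: r' → pvPipe l' = false) :
    goB [] true ls = goB [] false ls := by
  cases hd : ls.dropWhile pvBlank with
  | nil => rw [goB_span_nil [] true hd, goB_span_nil [] false hd]
  | cons l' r' =>
    rw [goB_span_cons [] true hd, goB_span_cons [] false hd, h l' r' hd]
    simp

-- the inner while advances exactly over the blank prefix
theorem pvSkipBlanks_ge (lines : List String) (fuel : Nat) :
    ∀ j, j ≤ pvSkipBlanks lines fuel j := by
  induction fuel with
  | zero => intro j; simp [pvSkipBlanks]
  | succ fuel ih =>
    intro j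
    rw [pvSkipBlanks]
    split
    · split
      · exact le_trans (by omega) (ih (j + 1))
      · exact le_refl j
    · exact le_refl j

theorem pvSkipBlanks_drop (lines : List String) (fuel : Nat) :
    ∀ j, lines.length - j ≤ fuel →
    (lines.drop j).dropWhile pvBlank = lines.drop (pvSkipBlanks lines fuel j) := by
  induction fuel with
  | zero =>
    intro j hj
    rw [pvSkipBlanks, List.drop_eq_nil_of_le (by omega)]
    simp
  | succ fuel ih =>
    intro j hj
    rw [pvSkipBlanks]
    split
    · rename_i h
      rw [List.drop_eq_getElem_cons h]
      by_cases hb : pvBlank lines[j] = true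
      · rw [List.dropWhile_cons_of_pos hb, if_pos hb]
        exact ih (j + 1) (by omega)
      · rw [List.dropWhile_cons_of_neg hb, if_neg hb, ← List.drop_eq_getElem_cons h]
    · rename_i h
      rw [List.drop_eq_nil_of_le (by omega)]
      simp

-- A's loop computes B's scan over the remaining lines
theorem pvLoopA_eq_goB (lines : List String) (fuel : Nat) :
    ∀ (i : Nat) (output : List String), lines.length - i ≤ fuel →
    pvLoopA lines fuel i output = output ++ goB [] false (lines.drop i) := by
  induction fuel with
  | zero =>
    intro i output hi
    rw [pvLoopA, List.drop_eq_nil_of_le (by omega)]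
    simp [goB]
  | succ fuel ih =>
    intro i output hi
    rw [pvLoopA]
    split
    · rename_i h
      have hdrop : lines.drop i = lines[i] :: lines.drop (i + 1) := List.drop_eq_getElem_cons h
      by_cases hp : pvPipe lines[i] = true
      · simp only [hp, if_true]
        rw [hdrop, goB_cons_pipe _ hp]
        have hskip : (lines.drop (i + 1)).dropWhile pvBlank
            = lines.drop (pvSkipBlanks lines lines.length (i + 1)) :=
          pvSkipBlanks_drop lines lines.length (i + 1) (by omega)
        have hge : i + 1 ≤ pvSkipBlanks lines lines.length (i + 1) :=
          pvSkipBlanks_ge lines lines.length (i + 1)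
        split
        · rename_i h2
          have hdropj : lines.drop (pvSkipBlanks lines lines.length (i + 1))
              = lines[pvSkipBlanks lines lines.length (i + 1)]
                :: lines.drop (pvSkipBlanks lines lines.length (i + 1) + 1) :=
            List.drop_eq_getElem_cons h2
          rw [hdropj] at hskip
          by_cases hpj : pvPipe lines[pvSkipBlanks lines lines.length (i + 1)] = true
          · rw [if_pos hpj, ih _ (output ++ [lines[i]]) (by omega)]
            rw [goB_span_cons [] true hskip, hdropj,
              goB_cons_pipe _ hpj]
            simp [hpj]
          · rw [if_neg hpj, ih (i + 1) (output ++ [lines[i]]) (by omega)]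
            rw [goB_flag_irrel (by
              intro l' r' hd
              rw [hskip] at hd
              cases hd
              simpa using hpj)]
            simp
        · rename_i h2
          rw [List.drop_eq_nil_of_le
            (show lines.length ≤ pvSkipBlanks lines lines.length (i + 1) by omega)] at hskip
          rw [ih (i + 1) (output ++ [lines[i]]) (by omega)]
          rw [goB_flag_irrel (by intro l' r' hd; rw [hskip] at hd; simp at hd)]
          simp
      · have hp' : pvPipe lines[i] = false := by simpa using hp
        simp only [hp', if_false, Bool.false_eq_true]
        rw [ih (i + 1) (output ++ [lines[i]]) (by omega), hdrop, goB_cons_nonpipe _ hp']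
        simp
    · rename_i h
      rw [List.drop_eq_nil_of_le (by omega)]
      simp [goB]

-- ===== VERDICT (by name: the statement is the Claim_ definition above) =====
theorem repair_orphaned_table_rows_spec : Claim_equal_repair_orphaned_table_rows := by
  intro md _
  unfold Spec_repair_orphaned_table_rows repair_orphaned_table_rows repair_orphaned_table_rows_alt
  show PySem.Str.join "\n" (pvLoopA (PySem.Str.splitlines md) (PySem.Str.splitlines md).length 0 []) =
    PySem.Str.join "\n"
      (((PySem.Str.splitlines md).foldl pvStepB ([], [], false)).1 ++
        ((PySem.Str.splitlines md).foldl pvStepB ([], [], false)).2.1)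
  rw [pvLoopA_eq_goB _ _ 0 [] (by omega), foldl_stepB]
  simp
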